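-- pv_equiv track=rewrite | github.com/brianV05/se_2024_hands_on | Python/string_manipulation.py | article_count
-- ===== SOURCE A (Python) =====
-- def article_count(input_string):
--     article = ['a', 'an', 'the']
--     words = input_string.lower().split()
--     count = 0
--
--     for word in words:
--         if word in article:
--             count += 1
--     return count
-- ===== SOURCE B (Python) =====
-- def article_count(input_string):
--     counts = {}
--     for word in input_string.lower().split():
--         counts[word] = counts.get(word, 0) + 1
--     return counts.get('a', 0) + counts.get('an', 0) + counts.get('the', 0)
-- ===== Notes on version B (the rewrite author's own statement) =====
-- stated objective: idiomatic
-- what changed: B builds a frequency table of the lowercased words in one pass and then sums the lookups for the three fixed article keys, instead of testing each word for membership in the article list.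
import Mathlib
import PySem

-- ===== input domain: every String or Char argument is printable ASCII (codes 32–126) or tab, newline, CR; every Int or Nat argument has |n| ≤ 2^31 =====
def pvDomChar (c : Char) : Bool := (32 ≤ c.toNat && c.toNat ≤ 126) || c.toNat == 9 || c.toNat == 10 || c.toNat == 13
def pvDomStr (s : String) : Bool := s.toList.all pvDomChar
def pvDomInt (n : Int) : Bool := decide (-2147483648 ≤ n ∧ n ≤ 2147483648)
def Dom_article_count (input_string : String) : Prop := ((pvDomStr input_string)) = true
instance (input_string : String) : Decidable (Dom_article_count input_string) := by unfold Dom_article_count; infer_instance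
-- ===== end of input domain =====

-- B replaces the per-word membership test by a one-pass frequency table plus three fixed lookups (idiomatic; same cost).

-- ===== PORT A =====
def article_count (input_string : String) : Int :=
  let article : List String := ["a", "an", "the"]
  let words := PySem.Str.split₀ (PySem.Str.lower input_string)
  words.foldl (fun count word => if article.contains word then count + 1 else count) 0

-- ===== PORT B =====
def article_count_alt (input_string : String) : Int :=
  let counts := (PySem.Str.split₀ (PySem.Str.lower input_string)).foldl
      (fun d w => d.insert w (d.getD w 0 + 1)) (PySem.Dict.empty : PySem.Dict String Int)
  counts.getD "a" 0 + counts.getD "an" 0 + counts.getD "the" 0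

-- ===== PRECONDITION & SPEC =====
def Spec_article_count (input_string : String) (out : Int) : Prop := out = article_count_alt input_string
instance (input_string : String) (out : Int) : Decidable (Spec_article_count input_string out) := by unfold Spec_article_count; infer_instance

-- ===== CLAIM (what is proved, stated in full; the proofs are below) =====
def Claim_equal_article_count : Prop := ∀ (input_string : String), Dom_article_count input_string → Spec_article_count input_string (article_count input_string)

-- ===== LEMMAS AND PROOFS =====
theorem countP_articles (l : List String) :
    l.countP (fun w => (["a", "an", "the"] : List String).contains w)
      = l.count "a" + l.count "an" + l.count "the" := by
  induction l with
  | nil => simp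
  | cons w t ih =>
    simp only [List.countP_cons, List.count_cons, ih]
    by_cases h1 : w = "a" <;> by_cases h2 : w = "an" <;> by_cases h3 : w = "the" <;>
      simp_all <;> omega

-- ===== VERDICT (by name: the statement is the Claim_ definition above) =====
theorem article_count_spec : Claim_equal_article_count := by
  intro s _
  unfold Spec_article_count article_count article_count_alt
  simp only [PySem.List.foldl_if_add_one, PySem.Dict.getD_foldl_insert_add_one,
    PySem.Dict.getD_empty, countP_articles]
  push_cast
  ring
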